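-- pv_equiv track=rewrite | github.com/fionazp/MCIT_591 | HW 3/HW3_Tower_Blaster/tower_blaster.py | decide_brick_to_be_replaced
-- ===== SOURCE A (Python) =====
-- def count_conflicts(tower):
--     ''' Count how many conflicts are there in a tower.
--         A conflict happens when the first element's index is smaller than the second element but
--         the first element's value is larger than the second element.
--         The fewer the conflicts, the more stable the tower is.
--         A stable tower that wins the game should have zero conflict.'''
--     brick_conflicts = 0
--
--     for i in range(len(tower)):
--         for j in range(i):
--             if tower[j] > tower[i]:
--                 brick_conflicts += 1
--
--     return brick_conflicts
--
-- def decide_brick_to_be_replaced(new_brick, tower):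
--     ''' Decide which brick should be replaced to move the game towards winning.
--         Iterate over the tower and calculate the conflicts after replacing each brick.
--         The brick resulting in the least conflicts after being replaces is the one that should be replaced.
--         If multiple bricks would satisfy as the brick that should be replaced, the last one would be picked.'''
--
--     # copy the tower to a new list
--     tower_trial = tower.copy()
--
--     # set the index of the brick to be replaced to -1 so we would cover all the index in the list
--     brick_to_be_replaced_index = -1
--
--     # create the variable for the conflicts in the tower
--     tower_conflicts = count_conflicts(tower_trial)
--
--     # iterate the new list that has the same value with tower
--     for i in range(len(tower_trial)):
--
--         # calculate the amount of conflicts after replacing each of the brick, from top to bottom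
--         tower_trial[i] = new_brick
--         updated_tower_conflicts = count_conflicts(tower_trial)
--
--         # decide which brick would result in the least conflicts
--         if updated_tower_conflicts < tower_conflicts:
--             tower_conflicts = updated_tower_conflicts
--             brick_to_be_replaced_index = i
--
--         tower_trial[i]= tower[i]
--
--     return brick_to_be_replaced_index
-- ===== SOURCE B (Python) =====
-- def decide_brick_to_be_replaced(new_brick, tower):
--     # One O(n^2) pass: for each index compute the CHANGE in conflict count caused by
--     # replacing tower[i] with new_brick (only pairs involving i change), and keep the
--     # first index with the strictly smallest negative change.
--     n = len(tower)
--     best_delta = 0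
--     best_idx = -1
--     for i in range(n):
--         ti = tower[i]
--         d = 0
--         for j in range(i):
--             d += (tower[j] > new_brick) - (tower[j] > ti)
--         for j in range(i + 1, n):
--             d += (new_brick > tower[j]) - (ti > tower[j])
--         if d < best_delta:
--             best_delta = d
--             best_idx = i
--     return best_idx
-- ===== Notes on version B (the rewrite author's own statement) =====
-- stated objective: faster
-- what changed: Instead of rebuilding the full O(n^2) conflict count for every candidate index, B computes the base-relative change in conflicts per index in one O(n) pass (only pairs involving the replaced position change) and tracks the first index with the smallest negative change.
import Mathlib
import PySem

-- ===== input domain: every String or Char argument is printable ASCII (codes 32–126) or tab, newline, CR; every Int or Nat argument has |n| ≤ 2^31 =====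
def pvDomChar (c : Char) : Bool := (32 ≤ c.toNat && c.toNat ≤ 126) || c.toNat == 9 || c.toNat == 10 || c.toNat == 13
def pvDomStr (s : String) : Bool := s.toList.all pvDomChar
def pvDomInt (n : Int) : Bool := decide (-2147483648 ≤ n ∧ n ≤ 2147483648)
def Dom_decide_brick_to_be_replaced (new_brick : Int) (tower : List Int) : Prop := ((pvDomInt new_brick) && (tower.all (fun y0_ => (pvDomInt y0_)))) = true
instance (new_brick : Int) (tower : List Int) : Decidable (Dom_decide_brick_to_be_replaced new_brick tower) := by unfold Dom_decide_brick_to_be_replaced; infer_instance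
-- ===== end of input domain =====

-- B avoids recomputing the whole O(n^2) conflict count for every candidate index: it computes, in one
-- O(n) inner pass per index, only the CHANGE in conflicts caused by replacing that brick (only pairs
-- involving the replaced position change), and keeps the first index with the smallest negative change.
-- Objective: faster (O(n^2) instead of A's O(n^3)); return value only, no argument is mutated by either.

-- ===== PORT A =====
def count_conflicts (tower : List Int) : Int :=
  (PySem.List.pyRange 0 (tower.length : Int) 1).foldl
    (fun bc i =>
      (PySem.List.pyRange 0 i 1).foldl
        (fun bc2 j => if PySem.List.pyGetD tower j 0 > PySem.List.pyGetD tower i 0 then bc2 + 1 else bc2)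
        bc)
    0

-- loop body of A's for-loop: state = (tower_trial, tower_conflicts, brick_to_be_replaced_index)
def pvStepA (new_brick : Int) (tower : List Int) (st : List Int × Int × Int) (i : Int) : List Int × Int × Int :=
  let trial1 := PySem.List.pySetD st.1 i new_brick
  let u := count_conflicts trial1
  let ci := if u < st.2.1 then (u, i) else (st.2.1, st.2.2)
  (PySem.List.pySetD trial1 i (PySem.List.pyGetD tower i 0), ci.1, ci.2)

def decide_brick_to_be_replaced (new_brick : Int) (tower : List Int) : Int :=
  let tower_trial := tower   -- tower.copy()
  ((PySem.List.pyRange 0 (tower_trial.length : Int) 1).foldl (pvStepA new_brick tower)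
    (tower_trial, count_conflicts tower_trial, -1)).2.2

-- ===== PORT B =====
-- change in the conflict count if tower[i] is replaced by new_brick
def pvDelta (new_brick : Int) (tower : List Int) (i : Int) : Int :=
  let ti := PySem.List.pyGetD tower i 0
  let d1 := (PySem.List.pyRange 0 i 1).foldl
    (fun d j => d + ((if PySem.List.pyGetD tower j 0 > new_brick then (1:Int) else 0)
                   - (if PySem.List.pyGetD tower j 0 > ti then (1:Int) else 0))) 0
  (PySem.List.pyRange (i+1) (tower.length : Int) 1).foldl
    (fun d j => d + ((if new_brick > PySem.List.pyGetD tower j 0 then (1:Int) else 0)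
                   - (if ti > PySem.List.pyGetD tower j 0 then (1:Int) else 0))) d1

-- loop body of B's for-loop: state = (best_delta, best_idx)
def pvStepB (new_brick : Int) (tower : List Int) (st : Int × Int) (i : Int) : Int × Int :=
  let d := pvDelta new_brick tower i
  if d < st.1 then (d, i) else st

def decide_brick_to_be_replaced_alt (new_brick : Int) (tower : List Int) : Int :=
  ((PySem.List.pyRange 0 (tower.length : Int) 1).foldl (pvStepB new_brick tower) (0, -1)).2

-- ===== PRECONDITION & SPEC =====
def Spec_decide_brick_to_be_replaced (new_brick : Int) (tower : List Int) (out : Int) : Prop := out = decide_brick_to_be_replaced_alt new_brick tower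
instance (new_brick : Int) (tower : List Int) (out : Int) : Decidable (Spec_decide_brick_to_be_replaced new_brick tower out) := by unfold Spec_decide_brick_to_be_replaced; infer_instance

-- ===== CLAIM (what is proved, stated in full; the proofs are below) =====
def Claim_equal_decide_brick_to_be_replaced : Prop := ∀ (new_brick : Int) (tower : List Int), Dom_decide_brick_to_be_replaced new_brick tower → Spec_decide_brick_to_be_replaced new_brick tower (decide_brick_to_be_replaced new_brick tower)

-- ===== LEMMAS AND PROOFS =====

-- number of conflicts the element at position i contributes with earlier positions, as a sum
def pvS (t : List Int) (i : Int) : Int :=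
  ((PySem.List.pyRange 0 i 1).map
    (fun j => if PySem.List.pyGetD t j 0 > PySem.List.pyGetD t i 0 then (1:Int) else 0)).sum

def pvCC (t : List Int) : Int := ((PySem.List.pyRange 0 (t.length : Int) 1).map (pvS t)).sum

theorem pv_inner_eq (t : List Int) (i : Int) (bc : Int) :
    (PySem.List.pyRange 0 i 1).foldl
      (fun bc2 j => if PySem.List.pyGetD t j 0 > PySem.List.pyGetD t i 0 then bc2 + 1 else bc2) bc
    = bc + pvS t i := by
  unfold pvS
  rw [show (fun bc2 j => if PySem.List.pyGetD t j 0 > PySem.List.pyGetD t i 0 then bc2 + 1 else bc2)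
      = (fun bc2 j => bc2 + if PySem.List.pyGetD t j 0 > PySem.List.pyGetD t i 0 then (1:Int) else 0)
      from funext fun a => funext fun j => by split_ifs <;> ring]
  exact PySem.List.foldl_add _ _ _

theorem count_conflicts_eq (t : List Int) : count_conflicts t = pvCC t := by
  unfold count_conflicts pvCC
  rw [show (fun bc i => (PySem.List.pyRange 0 i 1).foldl
      (fun bc2 j => if PySem.List.pyGetD t j 0 > PySem.List.pyGetD t i 0 then bc2 + 1 else bc2) bc)
      = (fun bc i => bc + pvS t i) from funext fun bc => funext fun i => pv_inner_eq t i bc]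
  rw [PySem.List.foldl_add]
  ring

theorem pv_getD_set_ne (t : List Int) (k : Nat) (x : Int) (j : Int) (hj : 0 ≤ j)
    (hk : k < t.length) (hne : j ≠ (k : Int)) :
    PySem.List.pyGetD (t.set k x) j 0 = PySem.List.pyGetD t j 0 := by
  lift j to ℕ using hj with m
  rw [← PySem.List.pySetD_natCast t k x, PySem.List.pyGetD_pySetD_natCast t k m x 0 hk]
  have hmk : m ≠ k := by exact_mod_cast hne
  simp [hmk]

theorem pv_getD_set_self (t : List Int) (k : Nat) (x : Int) (hk : k < t.length) :
    PySem.List.pyGetD (t.set k x) (k : Int) 0 = x := by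
  rw [← PySem.List.pySetD_natCast t k x, PySem.List.pyGetD_pySetD_natCast t k k x 0 hk]
  simp

theorem pv_sum_map_sub (l : List Int) (f g : Int → Int) :
    (l.map (fun x => f x - g x)).sum = (l.map f).sum - (l.map g).sum := by
  induction l with
  | nil => simp
  | cons a l ih => simp only [List.map_cons, List.sum_cons, ih]; ring

-- pvS of an index strictly below the replaced position is unchanged
theorem pvS_set_lt (t : List Int) (k : Nat) (nb : Int) (hk : k < t.length) (i : Int)
    (h0 : 0 ≤ i) (h1 : i < (k : Int)) : pvS (t.set k nb) i = pvS t i := by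
  unfold pvS
  rw [pv_getD_set_ne t k nb i h0 hk (by omega)]
  refine congrArg List.sum (List.map_congr_left ?_)
  intro j hj
  obtain ⟨hj0, hj1⟩ := (PySem.List.mem_pyRange_one).mp hj
  rw [pv_getD_set_ne t k nb j hj0 hk (by omega)]

-- pvS at the replaced position counts earlier bricks above the new brick
theorem pvS_set_at (t : List Int) (k : Nat) (nb : Int) (hk : k < t.length) :
    pvS (t.set k nb) (k : Int)
    = ((PySem.List.pyRange 0 (k : Int) 1).map
        (fun j => if PySem.List.pyGetD t j 0 > nb then (1:Int) else 0)).sum := by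
  unfold pvS
  rw [pv_getD_set_self t k nb hk]
  refine congrArg List.sum (List.map_congr_left ?_)
  intro j hj
  obtain ⟨hj0, hj1⟩ := (PySem.List.mem_pyRange_one).mp hj
  rw [pv_getD_set_ne t k nb j hj0 hk (by omega)]

-- split pvS s i at an intermediate position kz < i
theorem pvS_split (s : List Int) (i kz : Int) (h0 : 0 ≤ kz) (h1 : kz < i) :
    pvS s i
    = ((PySem.List.pyRange 0 kz 1).map
        (fun j => if PySem.List.pyGetD s j 0 > PySem.List.pyGetD s i 0 then (1:Int) else 0)).sum
      + (if PySem.List.pyGetD s kz 0 > PySem.List.pyGetD s i 0 then (1:Int) else 0)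
      + ((PySem.List.pyRange (kz+1) i 1).map
        (fun j => if PySem.List.pyGetD s j 0 > PySem.List.pyGetD s i 0 then (1:Int) else 0)).sum := by
  unfold pvS
  rw [PySem.List.pyRange_one_append 0 kz i h0 (by omega), PySem.List.pyRange_one_cons h1]
  simp only [List.map_append, List.sum_append, List.map_cons, List.sum_cons]
  ring

-- pvS of an index strictly above the replaced position changes by the pair with that position
theorem pvS_set_gt (t : List Int) (k : Nat) (nb : Int) (hk : k < t.length) (i : Int)
    (h1 : (k : Int) < i) :
    pvS (t.set k nb) i
    = pvS t i + ((if nb > PySem.List.pyGetD t i 0 then (1:Int) else 0)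
               - (if PySem.List.pyGetD t (k : Int) 0 > PySem.List.pyGetD t i 0 then (1:Int) else 0)) := by
  have e1 := pvS_split (t.set k nb) i (k : Int) (by positivity) h1
  have e2 := pvS_split t i (k : Int) (by positivity) h1
  rw [pv_getD_set_ne t k nb i (by omega) hk (by omega), pv_getD_set_self t k nb hk] at e1
  have mm : ∀ (R : List Int), (∀ j ∈ R, 0 ≤ j ∧ j ≠ (k : Int)) →
      R.map (fun j => if PySem.List.pyGetD (t.set k nb) j 0 > PySem.List.pyGetD t i 0 then (1:Int) else 0)
      = R.map (fun j => if PySem.List.pyGetD t j 0 > PySem.List.pyGetD t i 0 then (1:Int) else 0) := by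
    intro R hR
    refine List.map_congr_left ?_
    intro j hj
    rw [pv_getD_set_ne t k nb j (hR j hj).1 hk (hR j hj).2]
  rw [mm _ (fun j hj => by
        obtain ⟨hj0, hj1⟩ := (PySem.List.mem_pyRange_one).mp hj; exact ⟨hj0, by omega⟩),
      mm _ (fun j hj => by
        obtain ⟨hj0, hj1⟩ := (PySem.List.mem_pyRange_one).mp hj; exact ⟨by omega, by omega⟩)] at e1
  rw [e1, e2]
  ring

-- pvDelta as a difference of sums
theorem pvDelta_eq (nb : Int) (t : List Int) (i : Int) :
    pvDelta nb t i
    = ((PySem.List.pyRange 0 i 1).map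
        (fun j => (if PySem.List.pyGetD t j 0 > nb then (1:Int) else 0)
                - (if PySem.List.pyGetD t j 0 > PySem.List.pyGetD t i 0 then (1:Int) else 0))).sum
      + ((PySem.List.pyRange (i+1) (t.length : Int) 1).map
        (fun j => (if nb > PySem.List.pyGetD t j 0 then (1:Int) else 0)
                - (if PySem.List.pyGetD t i 0 > PySem.List.pyGetD t j 0 then (1:Int) else 0))).sum := by
  unfold pvDelta
  rw [PySem.List.foldl_add, PySem.List.foldl_add]
  ring

-- KEY LEMMA: replacing position k changes the conflict count by exactly pvDelta
theorem pv_key (nb : Int) (t : List Int) (k : Nat) (hk : k < t.length) :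
    count_conflicts (t.set k nb) = count_conflicts t + pvDelta nb t (k : Int) := by
  rw [count_conflicts_eq, count_conflicts_eq, pvDelta_eq]
  unfold pvCC
  rw [List.length_set]
  have hkz : (k : Int) < (t.length : Int) := by exact_mod_cast hk
  rw [PySem.List.pyRange_one_append 0 (k : Int) (t.length : Int) (by positivity) (by omega),
      PySem.List.pyRange_one_cons hkz]
  simp only [List.map_append, List.sum_append, List.map_cons, List.sum_cons]
  have A1 : (PySem.List.pyRange 0 (k : Int) 1).map (pvS (t.set k nb))
      = (PySem.List.pyRange 0 (k : Int) 1).map (pvS t) := by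
    refine List.map_congr_left ?_
    intro i hi
    obtain ⟨hi0, hi1⟩ := (PySem.List.mem_pyRange_one).mp hi
    exact pvS_set_lt t k nb hk i hi0 hi1
  have A2 : (PySem.List.pyRange ((k : Int)+1) (t.length : Int) 1).map (pvS (t.set k nb))
      = (PySem.List.pyRange ((k : Int)+1) (t.length : Int) 1).map
          (fun i => pvS t i + ((if nb > PySem.List.pyGetD t i 0 then (1:Int) else 0)
                - (if PySem.List.pyGetD t (k : Int) 0 > PySem.List.pyGetD t i 0 then (1:Int) else 0))) := by
    refine List.map_congr_left ?_
    intro i hi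
    obtain ⟨hi0, hi1⟩ := (PySem.List.mem_pyRange_one).mp hi
    exact pvS_set_gt t k nb hk i (by omega)
  rw [A1, A2, pvS_set_at t k nb hk, PySem.List.sum_map_add_int]
  rw [pv_sum_map_sub ((PySem.List.pyRange 0 (k : Int) 1))
    (fun j => if PySem.List.pyGetD t j 0 > nb then (1:Int) else 0)
    (fun j => if PySem.List.pyGetD t j 0 > PySem.List.pyGetD t (k : Int) 0 then (1:Int) else 0)]
  unfold pvS
  ring

-- LOOP CORRESPONDENCE: A's loop state stays (tower, base + best_delta, best_idx)
theorem pv_loop (nb : Int) (t : List Int) (L : List Int)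
    (hL : ∀ i ∈ L, 0 ≤ i ∧ i < (t.length : Int)) (b idx : Int) :
    L.foldl (pvStepA nb t) (t, count_conflicts t + b, idx)
    = (t, count_conflicts t + (L.foldl (pvStepB nb t) (b, idx)).1,
          (L.foldl (pvStepB nb t) (b, idx)).2) := by
  induction L generalizing b idx with
  | nil => simp [List.foldl]
  | cons i L ih =>
    obtain ⟨h0, h1⟩ := hL i (List.mem_cons_self)
    lift i to ℕ using h0 with m
    have hm : m < t.length := by exact_mod_cast h1
    have hstep : pvStepA nb t (t, count_conflicts t + b, idx) (m : Int)
        = (t, count_conflicts t + (pvStepB nb t (b, idx) (m : Int)).1,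
              (pvStepB nb t (b, idx) (m : Int)).2) := by
      unfold pvStepA pvStepB
      simp only [PySem.List.pySetD_natCast, PySem.List.pyGetD_natCast]
      rw [pv_key nb t m hm, List.set_set,
          List.getD_eq_getElem t 0 hm, List.set_getElem_self hm]
      by_cases hd : pvDelta nb t (m : Int) < b
      · simp [hd, add_lt_add_iff_left]
      · simp [hd, add_lt_add_iff_left]
    simp only [List.foldl_cons, hstep]
    rw [ih (fun j hj => hL j (List.mem_cons_of_mem _ hj))
        (pvStepB nb t (b, idx) (m : Int)).1 (pvStepB nb t (b, idx) (m : Int)).2]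

-- ===== VERDICT (by name: the statement is the Claim_ definition above) =====
theorem decide_brick_to_be_replaced_spec : Claim_equal_decide_brick_to_be_replaced := by
  intro nb t _
  unfold Spec_decide_brick_to_be_replaced decide_brick_to_be_replaced decide_brick_to_be_replaced_alt
  have h := pv_loop nb t (PySem.List.pyRange 0 (t.length : Int) 1)
    (fun i hi => by
      have := (PySem.List.mem_pyRange_one).mp hi
      exact ⟨this.1, this.2⟩) 0 (-1)
  simp only [add_zero] at h
  simp only [h]
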